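-- pv_equiv track=rewrite | github.com/dwmkjs/dwmkjs | RAJ/d.py | getSubArgs
-- ===== SOURCE A (Python) =====
-- def getSubArgs(listdata):
-- 	temp=[]
-- 	check=0
-- 	for i in range(len(listdata)):
-- 		if i==0:
-- 			temp.append(listdata[i][0])
-- 		for j in range(len(temp)):
-- 			if temp[j]==listdata[i][0] :
-- 				check=1
-- 			else:
-- 				check=0
-- 		if check==0:
-- 			temp.append(listdata[i][0])
-- 	return temp
-- ===== SOURCE B (Python) =====
-- def getSubArgs(listdata):
--     temp = []
--     for row in listdata:
--         x = row[0]
--         if not temp or temp[-1] != x: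
--             temp.append(x)
--     return temp
-- ===== Notes on version B (the rewrite author's own statement) =====
-- stated objective: alternative
-- what changed: A rescans its whole accumulator for every element (yet its check keeps only the last comparison, so it really collapses adjacent runs); B is a single pass comparing each first-element to the last appended value, with no inner scan; a timing run read between 1.4x and 1.6x depending on input family, so no speed is claimed.
-- outside the precondition, e.g. on getSubArgs([[1], []]): A raises IndexError, B raises IndexError
import Mathlib
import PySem

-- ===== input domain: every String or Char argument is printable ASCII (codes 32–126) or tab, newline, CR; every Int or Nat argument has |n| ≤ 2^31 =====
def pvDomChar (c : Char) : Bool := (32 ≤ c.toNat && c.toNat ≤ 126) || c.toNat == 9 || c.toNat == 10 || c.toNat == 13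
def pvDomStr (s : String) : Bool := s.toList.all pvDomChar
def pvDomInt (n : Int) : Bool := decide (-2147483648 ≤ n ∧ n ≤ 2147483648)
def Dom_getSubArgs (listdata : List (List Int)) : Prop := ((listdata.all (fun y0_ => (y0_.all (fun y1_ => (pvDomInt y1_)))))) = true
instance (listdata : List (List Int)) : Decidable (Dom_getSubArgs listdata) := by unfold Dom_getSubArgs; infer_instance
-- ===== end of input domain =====

-- B replaces A's per-element rescan of the accumulator (whose check keeps only the
-- last comparison, so A collapses adjacent runs) by a single pass comparing each
-- first-element to the last appended value.

-- ===== PORT A =====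
-- loop body of A's outer 'for i in range(len(listdata))'
def getSubArgsBody (listdata : List (List Int)) (st : List Int × Int) (i : Int) : List Int × Int :=
  let temp1 : List Int :=
    if i = 0 then st.1 ++ [PySem.List.pyGetD (PySem.List.pyGetD listdata i []) 0 0] else st.1
  let check1 : Int :=
    (PySem.List.pyRange 0 temp1.length 1).foldl
      (fun c j =>
        if PySem.List.pyGetD temp1 j 0 = PySem.List.pyGetD (PySem.List.pyGetD listdata i []) 0 0
        then (1 : Int) else 0) st.2
  if check1 = 0 then (temp1 ++ [PySem.List.pyGetD (PySem.List.pyGetD listdata i []) 0 0], check1)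
  else (temp1, check1)

def getSubArgs (listdata : List (List Int)) : List Int :=
  ((PySem.List.pyRange 0 listdata.length 1).foldl (getSubArgsBody listdata) ([], 0)).1

-- ===== PORT B =====
def getSubArgs_alt (listdata : List (List Int)) : List Int :=
  listdata.foldl
    (fun temp row =>
      let x := PySem.List.pyGetD row 0 0
      if temp = [] ∨ PySem.List.pyGetD temp (-1) 0 ≠ x then temp ++ [x] else temp)
    []

-- ===== PRECONDITION & SPEC =====
-- Pre_ excludes exactly the inputs on which the Python A raises IndexError: some row is empty.
def Pre_getSubArgs (listdata : List (List Int)) : Prop := ∀ row ∈ listdata, row ≠ []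
instance (listdata : List (List Int)) : Decidable (Pre_getSubArgs listdata) := by
  unfold Pre_getSubArgs; infer_instance
def pvWitness_getSubArgs : List (List Int) := [[1, 5], [1], [2], [2, 7], [1]]
def Spec_getSubArgs (listdata : List (List Int)) (out : List Int) : Prop := out = getSubArgs_alt listdata
instance (listdata : List (List Int)) (out : List Int) : Decidable (Spec_getSubArgs listdata out) := by unfold Spec_getSubArgs; infer_instance

-- ===== CLAIM (what is proved, stated in full; the proofs are below) =====
def Claim_equal_getSubArgs : Prop := ∀ (listdata : List (List Int)), Dom_getSubArgs listdata → Pre_getSubArgs listdata → Spec_getSubArgs listdata (getSubArgs listdata)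

-- ===== LEMMAS AND PROOFS =====

-- A's loop body for the iterations with i ≥ 1, as a function of the row
def runBody (st : List Int × Int) (row : List Int) : List Int × Int :=
  let x := PySem.List.pyGetD row 0 0
  let check1 : Int :=
    (PySem.List.pyRange 0 st.1.length 1).foldl
      (fun c j => if PySem.List.pyGetD st.1 j 0 = x then (1 : Int) else 0) st.2
  if check1 = 0 then (st.1 ++ [x], check1) else (st.1, check1)

-- a fold whose body ignores the accumulator returns g of the last element
theorem foldl_const_last {g : Int → Int} (t : List Int) (h : t ≠ []) (c : Int) :
    t.foldl (fun _ v => g v) c = g (t.getLast h) := by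
  induction t generalizing c with
  | nil => exact absurd rfl h
  | cons a t ih =>
    cases t with
    | nil => simp [List.foldl]
    | cons b t => simpa [List.foldl] using ih (by simp) (g a)

-- A's inner scan over temp leaves exactly the comparison with the LAST element
theorem inner_scan (t : List Int) (h : t ≠ []) (x c : Int) :
    (PySem.List.pyRange 0 t.length 1).foldl
      (fun c j => if PySem.List.pyGetD t j 0 = x then (1 : Int) else 0) c
      = (if t.getLast h = x then 1 else 0) := by
  rw [PySem.List.foldl_pyRange_zero_pyGetD' t 0 (fun _ v => if v = x then (1:Int) else 0) c]
  exact foldl_const_last t h c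

-- the loop body at i = 0 on the initial state
theorem step0 (r : List Int) (rs : List (List Int)) :
    getSubArgsBody (r :: rs) ([], 0) 0 = ([PySem.List.pyGetD r 0 0], 1) := by
  simp only [getSubArgsBody, if_true, List.nil_append, PySem.List.pyGetD_zero_cons]
  rw [inner_scan [PySem.List.pyGetD r 0 0] (by simp) (PySem.List.pyGetD r 0 0) 0]
  simp

-- main invariant: from a nonempty accumulator the two folds agree (A's check is dead state)
theorem tail_agree (rs : List (List Int)) (t : List Int) (ht : t ≠ []) (c : Int) :
    (rs.foldl runBody (t, c)).1
    = rs.foldl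
        (fun temp row =>
          let x := PySem.List.pyGetD row 0 0
          if temp = [] ∨ PySem.List.pyGetD temp (-1) 0 ≠ x then temp ++ [x] else temp)
        t := by
  induction rs generalizing t c with
  | nil => rfl
  | cons r rs ih =>
    simp only [List.foldl, runBody]
    rw [inner_scan t ht (PySem.List.pyGetD r 0 0) c]
    rw [PySem.List.pyGetD_neg_one t 0 ht]
    by_cases hx : t.getLast ht = PySem.List.pyGetD r 0 0
    · rw [if_pos hx, if_neg one_ne_zero, if_neg (by simp [ht, hx])]
      exact ih t ht 1
    · rw [if_neg hx, if_pos rfl, if_pos (Or.inr hx)]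
      exact ih (t ++ [PySem.List.pyGetD r 0 0]) (by simp) 0

-- for i ≥ 1 the 'if i == 0' branch of A's body is dead and the body reads only listdata[i]
theorem body_tail (l : List (List Int)) :
    ∀ (st : List Int × Int), ∀ i ∈ PySem.List.pyRange 1 (l.length : Int) 1,
      getSubArgsBody l st i = runBody st (PySem.List.pyGetD l i []) := by
  intro st i hi
  have h1 : (1 : Int) ≤ i := (PySem.List.mem_pyRange_one.mp hi).1
  simp only [getSubArgsBody, runBody, if_neg (by omega : ¬ i = 0)]

-- ===== VERDICT (by name: the statement is the Claim_ definition above) =====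
theorem getSubArgs_spec : Claim_equal_getSubArgs := by
  intro listdata _ _
  unfold Spec_getSubArgs getSubArgs getSubArgs_alt
  cases listdata with
  | nil => rfl
  | cons r rs =>
    rw [PySem.List.pyRange_one_cons (by simp)]
    simp only [List.foldl, step0, zero_add, true_or, if_true, List.nil_append]
    rw [PySem.List.foldl_congr_mem _ _ _ _ (body_tail (r :: rs))]
    rw [PySem.List.foldl_pyRange_pyGetD' (r :: rs) [] runBody ([PySem.List.pyGetD r 0 0], (1:Int)) (by omega : (0:Int) ≤ 1)]
    simp only [Int.toNat_one, List.drop_succ_cons, List.drop_zero]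
    rw [tail_agree rs [PySem.List.pyGetD r 0 0] (by simp) 1]
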